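-- pv_equiv track=rewrite | github.com/seoul-ssafy-class-2-studyclub/Indong-python | Python/SWEA/D3/4789_성공적인 공연 기획.py | buying
-- ===== SOURCE A (Python) =====
-- def buying(aud):
--     N = len(aud)
--     acc_sum = [0] * (N + 1)
--     count = 0
--     for i in range(N):
--         acc_sum[i+1] = aud[i] + acc_sum[i]
--         if i >= N - 1:
--             continue
--         if i + 1 > acc_sum[i+1]:
--             diff = i + 1 - acc_sum[i+1]
--             acc_sum[i+1] += diff
--             count += diff
--     return count
-- ===== SOURCE B (Python) =====
-- def buying(aud):
--     n = len(aud)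
--     running = 0
--     best = 0
--     for i, a in enumerate(aud):
--         running += a
--         if i < n - 1:
--             best = max(best, (i + 1) - running)
--     return best
-- ===== Notes on version B (the rewrite author's own statement) =====
-- stated objective: simpler
-- what changed: Replaces the (N+1)-entry prefix-sum array with feedback corrections by two scalars: a plain running prefix sum and a running maximum of the deficit (i+1)-prefix, using the identity answer = max(0, max_{i<N-1}((i+1)-prefix(i+1))).
import Mathlib
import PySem

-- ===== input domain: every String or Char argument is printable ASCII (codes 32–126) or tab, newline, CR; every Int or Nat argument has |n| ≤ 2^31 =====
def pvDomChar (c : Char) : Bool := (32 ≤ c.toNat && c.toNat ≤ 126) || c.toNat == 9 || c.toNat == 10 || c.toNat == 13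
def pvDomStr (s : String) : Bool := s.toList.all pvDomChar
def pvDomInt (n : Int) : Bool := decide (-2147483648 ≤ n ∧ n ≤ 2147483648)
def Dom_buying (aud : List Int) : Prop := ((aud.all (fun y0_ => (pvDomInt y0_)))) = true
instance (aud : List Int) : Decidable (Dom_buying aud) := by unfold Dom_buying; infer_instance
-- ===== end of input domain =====

-- B replaces A's prefix-sum array with feedback corrections by two scalars (running sum, max deficit); objective: simpler.

-- ===== PORT A =====
-- literal port of A: acc_sum list of length N+1, corrections written back into it
-- (indices written/read are always nonnegative and in range, so .toNat/pyGetD are exact here)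
def buying (aud : List Int) : Int :=
  let N : Int := (aud.length : Int)
  let s := (PySem.List.pyRange 0 N 1).foldl (fun (s : List Int × Int) i =>
    let v := PySem.List.pyGetD aud i 0 + PySem.List.pyGetD s.1 i 0
    let acc := s.1.set (i + 1).toNat v
    if i ≥ N - 1 then (acc, s.2)
    else if i + 1 > v then
      (acc.set (i + 1).toNat (v + (i + 1 - v)), s.2 + (i + 1 - v))
    else (acc, s.2)) (List.replicate (N.toNat + 1) 0, 0)
  s.2

-- ===== PORT B =====
def buying_alt (aud : List Int) : Int :=
  let n : Int := (aud.length : Int)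
  let s := (PySem.List.enumerate aud 0).foldl (fun (s : Int × Int) p =>
    let running := s.1 + p.2
    (running, if p.1 < n - 1 then max s.2 ((p.1 + 1) - running) else s.2)) (0, 0)
  s.2

-- ===== PRECONDITION & SPEC =====
def Spec_buying (aud : List Int) (out : Int) : Prop := out = buying_alt aud
instance (aud : List Int) (out : Int) : Decidable (Spec_buying aud out) := by unfold Spec_buying; infer_instance

-- ===== CLAIM (what is proved, stated in full; the proofs are below) =====
def Claim_equal_buying : Prop := ∀ (aud : List Int), Dom_buying aud → Spec_buying aud (buying aud)

-- ===== LEMMAS AND PROOFS =====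

-- joint loop invariant: A's count equals B's best, and A's acc[i] equals B's running + best
theorem buying_loop (aud : List Int) :
    ∀ (rest : List Int) (i : Int) (acc : List Int) (c r : Int),
    0 ≤ i → aud.drop i.toNat = rest → acc.length = aud.length + 1 →
    PySem.List.pyGetD acc i 0 = r + c →
    ((PySem.List.pyRange i (aud.length : Int) 1).foldl (fun (s : List Int × Int) j =>
      let v := PySem.List.pyGetD aud j 0 + PySem.List.pyGetD s.1 j 0
      let acc := s.1.set (j + 1).toNat v
      if j ≥ (aud.length : Int) - 1 then (acc, s.2)
      else if j + 1 > v then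
        (acc.set (j + 1).toNat (v + (j + 1 - v)), s.2 + (j + 1 - v))
      else (acc, s.2)) (acc, c)).2
    = ((PySem.List.enumerate rest i).foldl (fun (s : Int × Int) p =>
      let running := s.1 + p.2
      (running, if p.1 < (aud.length : Int) - 1 then max s.2 ((p.1 + 1) - running) else s.2)) (r, c)).2 := by
  intro rest
  induction rest with
  | nil =>
    intro i acc c r hi hdrop _ _
    have hle : aud.length ≤ i.toNat := List.drop_eq_nil_iff.mp hdrop
    rw [PySem.List.pyRange_one_eq_nil (by omega), PySem.List.enumerate_nil]; rfl
  | cons x rest' ih =>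
    intro i acc c r hi hdrop hlen hacc
    have hlt : i.toNat < aud.length := by
      have := congrArg List.length hdrop
      simp [List.length_drop] at this
      omega
    have hx : PySem.List.pyGetD aud i 0 = x := by
      rw [PySem.List.pyGetD_eq_getElem aud 0 hi (by omega)]
      have h1 : (aud.drop i.toNat)[0]? = some x := by rw [hdrop]; rfl
      rw [List.getElem?_drop] at h1
      obtain ⟨_, he⟩ := List.getElem?_eq_some_iff.mp h1
      simpa using he
    have hdrop' : aud.drop (i + 1).toNat = rest' := by
      have hnat : (i + 1).toNat = i.toNat + 1 := by omega
      rw [hnat, ← List.drop_drop, hdrop]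
      rfl
    have hset : ∀ (l : List Int) (v : Int), l.length = aud.length + 1 →
        PySem.List.pyGetD (l.set (i + 1).toNat v) (i + 1) 0 = v := by
      intro l v hl
      rw [PySem.List.pyGetD_eq_getElem _ 0 (by omega) (by simp [hl]; omega)]
      exact List.getElem_set_self (by simp [hl]; omega)
    rw [PySem.List.pyRange_one_cons (by omega), List.foldl_cons,
        PySem.List.enumerate_cons, List.foldl_cons]
    simp only [hx, hacc]
    by_cases hlast : i ≥ (aud.length : Int) - 1
    · rw [if_pos hlast, if_neg (show ¬ i < (aud.length : Int) - 1 by omega)]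
      exact ih (i + 1) _ c (r + x) (by omega) hdrop' (by simp [hlen])
        (by rw [hset _ _ hlen]; ring)
    · by_cases hcond : i + 1 > x + (r + c)
      · rw [if_neg hlast, if_pos hcond,
            if_pos (show i < (aud.length : Int) - 1 by omega),
            show max c (i + 1 - (r + x)) = c + (i + 1 - (x + (r + c))) by omega]
        exact ih (i + 1) _ _ (r + x) (by omega) hdrop' (by simp [hlen])
          (by rw [hset _ _ (by simp [hlen])]; omega)
      · rw [if_neg hlast, if_neg hcond,
            if_pos (show i < (aud.length : Int) - 1 by omega),
            show max c (i + 1 - (r + x)) = c by omega]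
        exact ih (i + 1) _ c (r + x) (by omega) hdrop' (by simp [hlen])
          (by rw [hset _ _ hlen]; ring)

-- ===== VERDICT (by name: the statement is the Claim_ definition above) =====
theorem buying_spec : Claim_equal_buying := by
  intro aud _
  unfold Spec_buying buying buying_alt
  simp only []
  exact buying_loop aud aud 0 (List.replicate (((aud.length : Int)).toNat + 1) 0) 0 0
    (by omega) (by simp) (by simp)
    (by rw [PySem.List.pyGetD_eq_getElem _ 0 (by omega) (by simp)]; simp)
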